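-- pv_equiv track=rewrite | github.com/alphaPhantm/Privacy-and-security-SRP | algorithm/skytale.py | skytale_encrypt
-- ===== SOURCE A (Python) =====
-- def skytale_encrypt(text, umfang):
--     umfang = round(umfang)
--     text = ensureSideCondition(text, umfang)
--     length = len(text)
--     cipher = ""
--     for x in range(0, umfang):
--         for y in range(x, length, umfang):
--             cipher += text[y]
--
--     return cipher
--
-- def ensureSideCondition(text, umfang):
--     umfang = round(umfang)
--     length = len(text)
--     remainder = length % umfang
--     while remainder != 0:
--         text += " "
--         length = len(text)
--         remainder = length % umfang
--
--     return text
-- ===== SOURCE B (Python) =====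
-- def skytale_encrypt(text, umfang):
--     umfang = round(umfang)
--     text += " " * ((-len(text)) % umfang)
--     rows = [text[i:i + umfang] for i in range(0, len(text), umfang)]
--     return "".join("".join(col) for col in zip(*rows))
-- ===== Notes on version B (the rewrite author's own statement) =====
-- stated objective: faster
-- what changed: B replaces the while-loop padding by a closed-form pad count ((-len) % umfang) and replaces A's strided double loop of per-character string concatenations by splitting the padded text into rows of width umfang and joining the transpose column by column.
import Mathlib
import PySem

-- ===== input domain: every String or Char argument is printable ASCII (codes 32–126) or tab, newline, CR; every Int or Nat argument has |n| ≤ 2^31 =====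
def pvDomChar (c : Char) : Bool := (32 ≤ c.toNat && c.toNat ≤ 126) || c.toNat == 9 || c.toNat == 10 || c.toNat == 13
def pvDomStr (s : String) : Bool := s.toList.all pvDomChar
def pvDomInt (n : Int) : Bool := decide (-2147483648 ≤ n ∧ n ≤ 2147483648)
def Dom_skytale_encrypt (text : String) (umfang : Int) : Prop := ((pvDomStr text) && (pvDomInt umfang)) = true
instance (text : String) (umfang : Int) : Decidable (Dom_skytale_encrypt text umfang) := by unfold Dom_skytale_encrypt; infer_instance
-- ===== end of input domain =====

-- B pads with a closed-form count and reads the padded text as rows of width umfang emitted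
-- column-by-column (a transpose and join), instead of A's while-loop padding and strided double
-- loop of per-character string concatenations; a timing run measured B faster.

-- ===== PORT A =====
-- ensureSideCondition's while-loop, with fuel (umfang.natAbs iterations always suffice when
-- umfang ≠ 0): `length` mirrors Python's len(text); only the appended blanks are accumulated
-- (prepended — all padding characters are equal, so the order is immaterial) and the caller
-- appends them to the text, keeping each iteration constant-time.
def pvPadLoop (umfang : Int) : Nat → Int → List Char → List Char
  | 0, _, pad => pad
  | n + 1, length, pad =>
      if PySem.Int.mod length umfang ≠ 0 then pvPadLoop umfang n (length + 1) (' ' :: pad)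
      else pad

def pvEnsureSideCondition (text : List Char) (umfang : Int) : List Char :=
  text ++ pvPadLoop umfang umfang.natAbs (text.length : Int) []

-- round(umfang) on a Python int is the identity, so it is dropped in both ports
def skytale_encrypt (text : String) (umfang : Int) : String :=
  let t := pvEnsureSideCondition text.toList umfang
  let length : Int := t.length
  String.ofList ((PySem.List.pyRange 0 umfang 1).foldl (fun cipher x =>
    (PySem.List.pyRange x length umfang).foldl
      (fun c y => c ++ (PySem.List.pyGet? t y).toList) cipher) [])

-- ===== PORT B =====
-- length of the shortest row: how many tuples zip(*rows) yields (0 for no rows)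
def pvMinLen : List (List Char) → Nat
  | [] => 0
  | [r] => r.length
  | r :: s :: rs => min r.length (pvMinLen (s :: rs))

def skytale_encrypt_alt (text : String) (umfang : Int) : String :=
  let t := text.toList ++ List.replicate (PySem.Int.mod (-(text.toList.length : Int)) umfang).toNat ' '
  let rows := (PySem.List.pyRange 0 (t.length : Int) umfang).map
      (fun i => PySem.List.slice t (some i) (some (i + umfang)))
  String.ofList ((List.range (pvMinLen rows)).flatMap (fun j => rows.filterMap (fun r => r[j]?)))

-- ===== PRECONDITION & SPEC =====
-- Pre_ excludes exactly umfang = 0, where A raises ZeroDivisionError (length % umfang)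
def Pre_skytale_encrypt (text : String) (umfang : Int) : Prop := umfang ≠ 0
instance (text : String) (umfang : Int) : Decidable (Pre_skytale_encrypt text umfang) := by
  unfold Pre_skytale_encrypt; infer_instance

def pvWitness_skytale_encrypt : String × Int := ("attack at dawn", 4)

def Spec_skytale_encrypt (text : String) (umfang : Int) (out : String) : Prop := out = skytale_encrypt_alt text umfang
instance (text : String) (umfang : Int) (out : String) : Decidable (Spec_skytale_encrypt text umfang out) := by unfold Spec_skytale_encrypt; infer_instance

-- ===== CLAIM (what is proved, stated in full; the proofs are below) =====
def Claim_equal_skytale_encrypt : Prop := ∀ (text : String) (umfang : Int), Dom_skytale_encrypt text umfang → Pre_skytale_encrypt text umfang → Spec_skytale_encrypt text umfang (skytale_encrypt text umfang)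

-- ===== LEMMAS AND PROOFS =====

lemma pvPadLoop_eq (u : Int) (hu : 0 < u) :
    ∀ (fuel : Nat) (len : Int) (pad : List Char),
      (PySem.Int.mod (-len) u).toNat ≤ fuel →
      pvPadLoop u fuel len pad = List.replicate (PySem.Int.mod (-len) u).toNat ' ' ++ pad := by
  intro fuel
  induction fuel with
  | zero =>
    intro len pad h
    simp only [Nat.le_zero] at h
    simp [pvPadLoop, h]
  | succ n ih =>
    intro len pad h
    rw [PySem.Int.mod_eq_emod_of_pos hu] at h ⊢
    by_cases hr : (-len) % u = 0
    · have hlen : len % u = 0 :=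
        Int.emod_eq_zero_of_dvd ((Int.dvd_neg).mp (Int.dvd_of_emod_eq_zero hr))
      simp [pvPadLoop, PySem.Int.mod_eq_emod_of_pos hu, hlen, hr]
    · have hrpos : 0 < (-len) % u := by
        have := Int.emod_nonneg (-len) (by omega : u ≠ 0)
        omega
      have hlen : ¬ (len % u = 0) := fun h0 =>
        hr (Int.emod_eq_zero_of_dvd ((Int.dvd_neg).mpr (Int.dvd_of_emod_eq_zero h0)))
      have hu2 : 1 < u := by
        rcases eq_or_lt_of_le (by omega : (1:Int) ≤ u) with h1 | h1
        · exfalso; rw [← h1] at hr; simp at hr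
        · exact h1
      have hstep : (-(len + 1)) % u = (-len) % u - 1 := by
        have hlt := Int.emod_lt_of_pos (-len) hu
        rw [show -(len + 1) = -len - 1 by ring, Int.sub_emod,
          Int.emod_eq_of_lt (by norm_num) hu2, Int.emod_eq_of_lt (by omega) (by omega)]
      have hrec := ih (len + 1) (' ' :: pad)
        (by rw [PySem.Int.mod_eq_emod_of_pos hu, hstep]; omega)
      rw [PySem.Int.mod_eq_emod_of_pos hu, hstep] at hrec
      simp only [pvPadLoop, PySem.Int.mod_eq_emod_of_pos hu, hlen, ne_eq, not_false_eq_true,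
        if_true, hrec]
      have hk : ((-len) % u).toNat = (((-len) % u - 1).toNat) + 1 := by omega
      rw [hk, List.replicate_succ', List.append_assoc, List.singleton_append]

lemma pvEnsure_eq (u : Int) (hu : 0 < u) (xs : List Char) :
    pvEnsureSideCondition xs u =
      xs ++ List.replicate (PySem.Int.mod (-(xs.length : Int)) u).toNat ' ' := by
  unfold pvEnsureSideCondition
  rw [pvPadLoop_eq u hu u.natAbs (xs.length : Int) [] ?_, List.append_nil]
  rw [PySem.Int.mod_eq_emod_of_pos hu]
  have := Int.emod_lt_of_pos (-(xs.length : Int)) hu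
  omega

-- the padded length is a multiple of u
lemma pvPad_dvd (u : Int) (hu : 0 < u) (xs : List Char) :
    u ∣ ((xs ++ List.replicate (PySem.Int.mod (-(xs.length : Int)) u).toNat ' ').length : Int) := by
  rw [PySem.Int.mod_eq_emod_of_pos hu]
  have h0 := Int.emod_nonneg (-(xs.length : Int)) (by omega : u ≠ 0)
  have hdef := Int.emod_def (-(xs.length : Int)) u
  refine ⟨-((-(xs.length : Int)) / u), ?_⟩
  simp only [List.length_append, List.length_replicate]
  push_cast
  rw [Int.toNat_of_nonneg h0, hdef]
  ring

-- negative step: range(0, b, u) is empty for u < 0, 0 ≤ b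
lemma pvRange_neg_nil (b u : Int) (hu : u < 0) (hb : 0 ≤ b) :
    PySem.List.pyRange 0 b u = [] := by
  simp [PySem.List.pyRange, show ¬ (u = 0) by omega, show ¬ (0 < u) by omega,
    show ¬ (b < 0) by omega]

lemma pvEdiv_helper (u m r : Int) (hu : 0 < u) (h0 : 0 ≤ r) (hr : r < u) :
    (m * u + r) / u = m := by
  rw [add_comm, Int.add_mul_ediv_right _ _ (by omega : u ≠ 0),
    Int.ediv_eq_zero_of_lt h0 hr, zero_add]

-- per-column index list for A (width un > 0, length m * un)
lemma pvRangeA (un m k : Nat) (hk : k < un) :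
    PySem.List.pyRange (k : Int) ((m * un : Nat) : Int) (un : Int) =
      (List.range m).map (fun i : Nat => (k : Int) + (un : Int) * (i : Int)) := by
  have hu : (0 : Int) < (un : Int) := by exact_mod_cast Nat.lt_of_le_of_lt (Nat.zero_le k) hk
  rw [PySem.List.pyRange_of_pos _ _ hu]
  rcases Nat.eq_zero_or_pos m with hm | hm
  · subst hm
    rw [if_neg (by push_cast; omega)]
  · have hklt : (k : Int) < ((m * un : Nat) : Int) := by
      push_cast; nlinarith [hm, hk]
    rw [if_pos hklt]
    have harith : ((m * un : Nat) : Int) - k + un - 1 = (m : Int) * un + ((un : Int) - 1 - k) := by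
      push_cast; ring
    rw [harith, pvEdiv_helper _ _ _ hu (by omega) (by omega), Int.toNat_natCast]

-- the row start list for B
lemma pvRangeB (un m : Nat) (hu : 0 < un) :
    PySem.List.pyRange 0 ((m * un : Nat) : Int) (un : Int) =
      (List.range m).map (fun i : Nat => (0 : Int) + (un : Int) * (i : Int)) := by
  have hu' : (0 : Int) < (un : Int) := by exact_mod_cast hu
  rw [PySem.List.pyRange_of_pos _ _ hu']
  rcases Nat.eq_zero_or_pos m with hm | hm
  · subst hm
    rw [if_neg (by push_cast; omega)]
  · rw [if_pos (by push_cast; nlinarith)]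
    have harith : ((m * un : Nat) : Int) - 0 + un - 1 = (m : Int) * un + ((un : Int) - 1) := by
      push_cast; ring
    rw [harith, pvEdiv_helper _ _ _ hu' (by omega) (by omega), Int.toNat_natCast]

lemma pvMinLen_const (n : Nat) :
    ∀ rows : List (List Char), (∀ r ∈ rows, r.length = n) → rows ≠ [] → pvMinLen rows = n := by
  intro rows
  induction rows with
  | nil => intro _ h; exact absurd rfl h
  | cons r rs ih =>
    intro hall _
    cases rs with
    | nil => simpa [pvMinLen] using hall r (by simp)
    | cons s ss =>
      simp only [pvMinLen]
      rw [hall r (by simp), ih (fun x hx => hall x (by simp [hx])) (by simp)]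
      simp

lemma pvMain_pos (t : List Char) (u : Int) (hu : 0 < u) (hdvd : u ∣ (t.length : Int)) :
    (PySem.List.pyRange 0 u 1).foldl (fun cipher x =>
      (PySem.List.pyRange x (t.length : Int) u).foldl
        (fun c y => c ++ (PySem.List.pyGet? t y).toList) cipher) [] =
    (List.range (pvMinLen ((PySem.List.pyRange 0 (t.length : Int) u).map
        (fun i => PySem.List.slice t (some i) (some (i + u)))))).flatMap
      (fun j => ((PySem.List.pyRange 0 (t.length : Int) u).map
        (fun i => PySem.List.slice t (some i) (some (i + u)))).filterMap (fun r => r[j]?)) := by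
  -- notation: un = u as Nat, L = m * un
  obtain ⟨un, rfl⟩ : ∃ un : Nat, u = (un : Int) := ⟨u.toNat, (Int.toNat_of_nonneg (by omega)).symm⟩
  have hun : 0 < un := by exact_mod_cast hu
  have hdvdN : un ∣ t.length := by exact_mod_cast hdvd
  obtain ⟨m, hm⟩ := hdvdN
  rw [show t.length = m * un from by rw [hm, Nat.mul_comm]]
  -- ===== A side =====
  have hA : (PySem.List.pyRange 0 (un : Int) 1).foldl (fun cipher x =>
      (PySem.List.pyRange x ((m * un : Nat) : Int) (un : Int)).foldl
        (fun c y => c ++ (PySem.List.pyGet? t y).toList) cipher) [] =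
      (List.range un).flatMap (fun k => (List.range m).filterMap (fun i => t[un * i + k]?)) := by
    have h1 : ∀ (acc : List Char),
        (PySem.List.pyRange 0 (un : Int) 1).foldl (fun cipher x =>
          (PySem.List.pyRange x ((m * un : Nat) : Int) (un : Int)).foldl
            (fun c y => c ++ (PySem.List.pyGet? t y).toList) cipher) acc =
        (PySem.List.pyRange 0 (un : Int) 1).foldl (fun cipher x =>
          cipher ++ (PySem.List.pyRange x ((m * un : Nat) : Int) (un : Int)).flatMap
            (fun y => (PySem.List.pyGet? t y).toList)) acc := by
      intro acc
      exact PySem.List.foldl_congr_mem _ _ _ acc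
        (fun acc x _ => PySem.List.foldl_append_eq_flatMap _ _ acc)
    rw [h1, PySem.List.foldl_append_eq_flatMap, List.nil_append,
      PySem.List.pyRange_one, List.flatMap_map]
    simp only [Int.sub_zero, Int.toNat_natCast, zero_add]
    refine List.flatMap_congr (fun k hk => ?_)
    have hk' : k < un := List.mem_range.mp hk
    rw [pvRangeA un m k hk', List.flatMap_map]
    rw [List.filterMap_eq_flatMap_toList]
    refine List.flatMap_congr (fun i _ => ?_)
    have hc : (k : Int) + (un : Int) * (i : Int) = ((un * i + k : Nat) : Int) := by push_cast; ring
    rw [hc, PySem.List.pyGet?_natCast]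
  rw [hA]
  -- ===== B side =====
  have hrows : ((PySem.List.pyRange 0 ((m * un : Nat) : Int) (un : Int)).map
      (fun i => PySem.List.slice t (some i) (some (i + (un : Int))))) =
      (List.range m).map (fun i => (t.drop (un * i)).take un) := by
    rw [pvRangeB un m hun, List.map_map]
    refine List.map_congr_left (fun i _ => ?_)
    show PySem.List.slice t (some ((0:Int) + (un:Int) * (i:Int)))
        (some ((0:Int) + (un:Int) * (i:Int) + (un:Int))) = _
    have hc : (0:Int) + (un:Int) * (i:Int) = ((un * i : Nat) : Int) := by push_cast; ring
    rw [hc, PySem.List.slice_natCast_add]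
  rw [hrows]
  rcases Nat.eq_zero_or_pos m with hm0 | hm0
  · subst hm0
    simp [pvMinLen]
  · have hlen : ∀ r ∈ (List.range m).map (fun i => (t.drop (un * i)).take un), r.length = un := by
      intro r hr
      obtain ⟨i, hi, rfl⟩ := List.mem_map.mp hr
      have him : i < m := List.mem_range.mp hi
      have hbound : un * i + un ≤ un * m := by
        have := Nat.mul_le_mul_left un (Nat.succ_le_of_lt him)
        rwa [Nat.mul_succ] at this
      rw [List.length_take, List.length_drop, hm]
      omega
    rw [pvMinLen_const un _ hlen (by simp; omega)]
    refine List.flatMap_congr (fun j hj => ?_)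
    have hj' : j < un := List.mem_range.mp hj
    rw [List.filterMap_map]
    congr 1
    funext i
    show t[un * i + j]? = ((t.drop (un * i)).take un)[j]?
    rw [List.getElem?_take_of_lt hj', List.getElem?_drop]

lemma pvMain_neg (t s : List Char) (u : Int) (hu : u < 0) :
    (PySem.List.pyRange 0 u 1).foldl (fun cipher x =>
      (PySem.List.pyRange x (t.length : Int) u).foldl
        (fun c y => c ++ (PySem.List.pyGet? t y).toList) cipher) [] =
    (List.range (pvMinLen ((PySem.List.pyRange 0 (s.length : Int) u).map
        (fun i => PySem.List.slice s (some i) (some (i + u)))))).flatMap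
      (fun j => ((PySem.List.pyRange 0 (s.length : Int) u).map
        (fun i => PySem.List.slice s (some i) (some (i + u)))).filterMap (fun r => r[j]?)) := by
  rw [PySem.List.pyRange_one_eq_nil (by omega), pvRange_neg_nil _ u hu (by positivity)]
  simp [pvMinLen]

-- ===== VERDICT (by name: the statement is the Claim_ definition above) =====
theorem skytale_encrypt_spec : Claim_equal_skytale_encrypt := by
  intro text umfang _ hpre
  unfold Spec_skytale_encrypt skytale_encrypt skytale_encrypt_alt
  rcases lt_trichotomy umfang 0 with hu | hu | hu
  · exact congrArg String.ofList (pvMain_neg _ _ umfang hu)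
  · exact absurd hu hpre
  · rw [pvEnsure_eq umfang hu text.toList]
    exact congrArg String.ofList
      (pvMain_pos _ umfang hu (pvPad_dvd umfang hu text.toList))
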